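-- pv_equiv track=rewrite | github.com/shinyeonjun/codeviz-lab | backend/app/modules/executions/visualizations/templates/palindrome_pointers/template.py | resolve_matched_indices
-- ===== SOURCE A (Python) =====
-- def resolve_matched_indices(length: int, left_index: int | None, right_index: int | None) -> list[int]:
--     if length <= 0:
--         return []
--
--     if left_index is None or right_index is None:
--         return []
--
--     matched = [index for index in range(length) if index < left_index or index > right_index]
--
--     if left_index == right_index and 0 <= left_index < length:
--         matched.append(left_index)
--
--     return sorted(set(matched))
-- ===== SOURCE B (Python) =====
-- def resolve_matched_indices(length: int, left_index: int | None, right_index: int | None) -> list[int]: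
--     if length <= 0 or left_index is None or right_index is None:
--         return []
--     if left_index > right_index:
--         return list(range(length))
--     left_part = list(range(min(max(left_index, 0), length)))
--     mid = [left_index] if left_index == right_index and 0 <= left_index < length else []
--     right_part = list(range(max(right_index + 1, 0), length))
--     return left_part + mid + right_part
-- ===== Notes on version B (the rewrite author's own statement) =====
-- stated objective: faster
-- what changed: B emits the three already-sorted pieces range(0,lo) + middle + range(right+1,length) directly instead of filtering the whole range and then deduplicating with set() and sorting.
import Mathlib
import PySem

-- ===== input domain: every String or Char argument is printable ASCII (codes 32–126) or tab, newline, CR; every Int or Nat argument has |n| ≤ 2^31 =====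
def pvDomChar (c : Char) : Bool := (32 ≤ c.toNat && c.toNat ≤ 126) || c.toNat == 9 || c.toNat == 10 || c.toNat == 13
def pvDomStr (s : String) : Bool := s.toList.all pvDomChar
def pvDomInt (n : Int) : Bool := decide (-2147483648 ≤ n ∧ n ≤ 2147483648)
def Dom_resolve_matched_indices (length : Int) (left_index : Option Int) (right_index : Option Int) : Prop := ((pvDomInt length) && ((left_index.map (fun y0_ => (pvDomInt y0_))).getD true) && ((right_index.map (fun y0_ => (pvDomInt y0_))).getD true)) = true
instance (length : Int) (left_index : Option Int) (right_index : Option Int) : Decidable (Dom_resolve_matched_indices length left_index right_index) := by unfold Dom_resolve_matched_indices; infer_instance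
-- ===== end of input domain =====

-- B replaces A's filter-over-range + set + sort by directly emitting the three already
-- sorted, disjoint ranges [0,lo) ++ middle ++ [ri+1,length): O(n) output, no sort.

-- ===== PORT A =====
def resolve_matched_indices (length : Int) (left_index : Option Int) (right_index : Option Int) : List Int :=
  if length ≤ 0 then []
  else
    match left_index, right_index with
    | some li, some ri =>
      let matched := (PySem.List.pyRange 0 length 1).filter (fun i => decide (i < li) || decide (ri < i))
      let matched := if li = ri ∧ 0 ≤ li ∧ li < length then matched ++ [li] else matched
      PySem.List.sorted (PySem.Set.ofList matched) (fun x => x) false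
    | _, _ => []

-- ===== PORT B =====
def resolve_matched_indices_alt (length : Int) (left_index : Option Int) (right_index : Option Int) : List Int :=
  match left_index with
  | none => []
  | some li =>
    match right_index with
    | none => []
    | some ri =>
      if length ≤ 0 then []
      else if ri < li then PySem.List.pyRange 0 length 1
      else
        PySem.List.pyRange 0 (min (max li 0) length) 1
          ++ (if li = ri ∧ 0 ≤ li ∧ li < length then [li] else [])
          ++ PySem.List.pyRange (max (ri + 1) 0) length 1

-- ===== PRECONDITION & SPEC =====
def Spec_resolve_matched_indices (length : Int) (left_index : Option Int) (right_index : Option Int) (out : List Int) : Prop := out = resolve_matched_indices_alt length left_index right_index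
instance (length : Int) (left_index : Option Int) (right_index : Option Int) (out : List Int) : Decidable (Spec_resolve_matched_indices length left_index right_index out) := by unfold Spec_resolve_matched_indices; infer_instance

-- ===== CLAIM (what is proved, stated in full; the proofs are below) =====
def Claim_equal_resolve_matched_indices : Prop := ∀ (length : Int) (left_index : Option Int) (right_index : Option Int), Dom_resolve_matched_indices length left_index right_index → Spec_resolve_matched_indices length left_index right_index (resolve_matched_indices length left_index right_index)

-- ===== LEMMAS AND PROOFS =====

-- The filtered range splits into the two outer ranges (clamped to [0,length]).
theorem pv_filter_split (length li ri : Int) (h0 : 0 ≤ length) (h : li ≤ ri) :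
    (PySem.List.pyRange 0 length 1).filter (fun i => decide (i < li) || decide (ri < i)) =
      PySem.List.pyRange 0 (min (max li 0) length) 1 ++
      PySem.List.pyRange (min (max (ri + 1) 0) length) length 1 := by
  have hsplit : PySem.List.pyRange 0 length 1 =
      PySem.List.pyRange 0 (min (max li 0) length) 1 ++
      PySem.List.pyRange (min (max li 0) length) (min (max (ri + 1) 0) length) 1 ++
      PySem.List.pyRange (min (max (ri + 1) 0) length) length 1 := by
    have e1 := PySem.List.pyRange_one_append 0 (min (max li 0) length) length (by omega) (by omega)
    have e2 := PySem.List.pyRange_one_append (min (max li 0) length) (min (max (ri + 1) 0) length)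
      length (by omega) (by omega)
    rw [e1, e2, List.append_assoc]
  rw [hsplit, List.filter_append, List.filter_append]
  have h1 : (PySem.List.pyRange 0 (min (max li 0) length) 1).filter
      (fun i => decide (i < li) || decide (ri < i)) =
      PySem.List.pyRange 0 (min (max li 0) length) 1 := by
    apply List.filter_eq_self.mpr
    intro i hi
    rw [PySem.List.mem_pyRange_one] at hi
    simp only [Bool.or_eq_true, decide_eq_true_eq]
    omega
  have h2 : (PySem.List.pyRange (min (max li 0) length) (min (max (ri + 1) 0) length) 1).filter
      (fun i => decide (i < li) || decide (ri < i)) = [] := by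
    apply List.filter_eq_nil_iff.mpr
    intro i hi
    rw [PySem.List.mem_pyRange_one] at hi
    simp only [Bool.or_eq_true, decide_eq_true_eq, not_or]
    omega
  have h3 : (PySem.List.pyRange (min (max (ri + 1) 0) length) length 1).filter
      (fun i => decide (i < li) || decide (ri < i)) =
      PySem.List.pyRange (min (max (ri + 1) 0) length) length 1 := by
    apply List.filter_eq_self.mpr
    intro i hi
    rw [PySem.List.mem_pyRange_one] at hi
    simp only [Bool.or_eq_true, decide_eq_true_eq]
    omega
  rw [h1, h2, h3, List.append_nil]

-- sorted(set(xs)) = xs when xs is already strictly increasing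
theorem pv_sorted_set_of_pairwise_lt (xs : List Int) (h : xs.Pairwise (· < ·)) :
    PySem.List.sorted (PySem.Set.ofList xs) (fun x => x) false = xs := by
  have hnd : xs.Nodup := List.Pairwise.imp (fun hab => ne_of_lt hab) h
  rw [PySem.Set.ofList_eq_self_of_nodup (xs := xs) hnd]
  apply PySem.List.sorted_eq_self_of_pairwise
  exact List.Pairwise.imp (fun hab => le_of_lt hab) h

theorem pv_pairwise_two_ranges (a b c d : Int) (h : b ≤ c) :
    (PySem.List.pyRange a b 1 ++ PySem.List.pyRange c d 1).Pairwise (· < ·) := by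
  rw [List.pairwise_append]
  refine ⟨PySem.List.pairwise_lt_pyRange_one a b, PySem.List.pairwise_lt_pyRange_one c d, ?_⟩
  intro x hx y hy
  rw [PySem.List.mem_pyRange_one] at hx hy
  omega

-- ===== VERDICT (by name: the statement is the Claim_ definition above) =====
theorem resolve_matched_indices_spec : Claim_equal_resolve_matched_indices := by
  intro length li? ri? _
  unfold Spec_resolve_matched_indices resolve_matched_indices resolve_matched_indices_alt
  match li?, ri? with
  | none, none => simp
  | none, some _ => simp
  | some _, none => simp
  | some li, some ri =>
    by_cases hlen : length ≤ 0
    · simp [hlen]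
    simp only [if_neg hlen]
    have h0 : (0:Int) ≤ length := by omega
    by_cases hlr : ri < li
    · -- the whole range is kept, the middle case cannot fire
      have hall : (PySem.List.pyRange 0 length 1).filter
          (fun i => decide (i < li) || decide (ri < i)) = PySem.List.pyRange 0 length 1 := by
        apply List.filter_eq_self.mpr
        intro i hi
        rw [PySem.List.mem_pyRange_one] at hi
        simp only [Bool.or_eq_true, decide_eq_true_eq]
        omega
      have hmid : ¬ (li = ri ∧ 0 ≤ li ∧ li < length) := by omega
      simp only [hall, if_pos hlr, if_neg hmid]
      exact pv_sorted_set_of_pairwise_lt _ (PySem.List.pairwise_lt_pyRange_one 0 length)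
    · have hle : li ≤ ri := by omega
      simp only [if_neg hlr, pv_filter_split length li ri h0 hle]
      by_cases hmid : li = ri ∧ 0 ≤ li ∧ li < length
      · -- middle index appended; the clamps degenerate to li and li+1
        obtain ⟨he, hl0, hll⟩ := hmid
        have hclo : min (max li 0) length = li := by omega
        have hchi : min (max (ri + 1) 0) length = li + 1 := by omega
        have hchi' : max (ri + 1) 0 = li + 1 := by omega
        have hchi2 : min (li + 1) length = li + 1 := by omega
        simp only [if_pos (⟨he, hl0, hll⟩ : li = ri ∧ 0 ≤ li ∧ li < length), hclo, hchi', hchi2]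
        have hperm : (PySem.List.pyRange 0 li 1 ++ [li] ++ PySem.List.pyRange (li + 1) length 1).Perm
            (PySem.List.pyRange 0 li 1 ++ PySem.List.pyRange (li + 1) length 1 ++ [li]) := by
          rw [List.append_assoc, List.append_assoc]
          exact List.Perm.append_left _ List.perm_append_comm
        have hpw : (PySem.List.pyRange 0 li 1 ++ [li] ++ PySem.List.pyRange (li + 1) length 1).Pairwise
            (fun a b => a < b) := by
          rw [List.pairwise_append, List.pairwise_append]
          refine ⟨⟨PySem.List.pairwise_lt_pyRange_one 0 li, List.pairwise_singleton _ _, ?_⟩,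
            PySem.List.pairwise_lt_pyRange_one (li + 1) length, ?_⟩
          · intro x hx y hy
            rw [PySem.List.mem_pyRange_one] at hx
            simp only [List.mem_singleton] at hy
            omega
          · intro x hx y hy
            rw [PySem.List.mem_pyRange_one] at hy
            rcases List.mem_append.mp hx with hx | hx
            · rw [PySem.List.mem_pyRange_one] at hx; omega
            · simp only [List.mem_singleton] at hx; omega
        have hnd : (PySem.List.pyRange 0 li 1 ++ PySem.List.pyRange (li + 1) length 1 ++ [li]).Nodup :=
          (hperm.nodup_iff).mp (List.Pairwise.imp (fun hab => ne_of_lt hab) hpw)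
        rw [PySem.Set.ofList_eq_self_of_nodup
          (xs := PySem.List.pyRange 0 li 1 ++ PySem.List.pyRange (li + 1) length 1 ++ [li]) hnd]
        apply PySem.List.sorted_eq_of_perm_of_pairwise_lt
        · exact hperm
        · exact hpw
      · -- no middle index: two disjoint ranges, in order
        simp only [if_neg hmid, List.append_nil]
        have hr3 : PySem.List.pyRange (min (max (ri + 1) 0) length) length 1 =
            PySem.List.pyRange (max (ri + 1) 0) length 1 := by
          by_cases hc : max (ri + 1) 0 ≤ length
          · rw [min_eq_left (by omega)]
          · rw [PySem.List.pyRange_one_eq_nil (by omega), PySem.List.pyRange_one_eq_nil (by omega)]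
        rw [pv_sorted_set_of_pairwise_lt _ (pv_pairwise_two_ranges _ _ _ _ (by omega)), hr3]
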